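-- pv_equiv track=rewrite | github.com/posl/comment_recommendation | script/mod_gen/3_time/zh/226_D/7.py | get_min_spell_number
-- ===== SOURCE A (Python) =====
-- def get_min_spell_number(n, x, y):
--     min_spell_number = n
--     for i in range(n):
--         for j in range(i+1, n):
--             spell_number = 0
--             for k in range(n):
--                 if k != i and k != j:
--                     if (x[k]-x[i])*(y[j]-y[i]) == (x[j]-x[i])*(y[k]-y[i]):
--                         spell_number += 1
--             if spell_number < min_spell_number:
--                 min_spell_number = spell_number
--     return min_spell_number
-- ===== SOURCE B (Python) =====
-- def _gcd(a, b):
--     while b: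
--         a, b = b, a % b
--     return a
--
--
-- def _norm(dx, dy):
--     g = _gcd(abs(dx), abs(dy))
--     if g == 0:
--         return (0, 0)
--     dx //= g
--     dy //= g
--     if dx < 0 or (dx == 0 and dy < 0):
--         dx, dy = -dx, -dy
--     return (dx, dy)
--
--
-- def get_min_spell_number(n, x, y):
--     best = n
--     for i in range(n):
--         cnt = {}
--         for k in range(n):
--             if k != i:
--                 key = _norm(x[k] - x[i], y[k] - y[i])
--                 cnt[key] = cnt.get(key, 0) + 1
--         zeros = cnt.get((0, 0), 0)
--         for j in range(i + 1, n):
--             d = _norm(x[j] - x[i], y[j] - y[i])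
--             s = n - 2 if d == (0, 0) else cnt.get(d, 0) + zeros - 1
--             if s < best:
--                 best = s
--     return best
-- ===== Notes on version B (the rewrite author's own statement) =====
-- stated objective: faster
-- what changed: A re-scans all n points for every pair (i,j); B, per anchor i, builds one hash counter of gcd-normalised direction vectors so each pair's collinear count becomes two dictionary lookups (group size plus duplicate count minus one), O(n^3) -> O(n^2); a timing run measured B faster.
-- outside the precondition, e.g. on get_min_spell_number(2, [0], [0]): A returns 0, B raises IndexError
import Mathlib
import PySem

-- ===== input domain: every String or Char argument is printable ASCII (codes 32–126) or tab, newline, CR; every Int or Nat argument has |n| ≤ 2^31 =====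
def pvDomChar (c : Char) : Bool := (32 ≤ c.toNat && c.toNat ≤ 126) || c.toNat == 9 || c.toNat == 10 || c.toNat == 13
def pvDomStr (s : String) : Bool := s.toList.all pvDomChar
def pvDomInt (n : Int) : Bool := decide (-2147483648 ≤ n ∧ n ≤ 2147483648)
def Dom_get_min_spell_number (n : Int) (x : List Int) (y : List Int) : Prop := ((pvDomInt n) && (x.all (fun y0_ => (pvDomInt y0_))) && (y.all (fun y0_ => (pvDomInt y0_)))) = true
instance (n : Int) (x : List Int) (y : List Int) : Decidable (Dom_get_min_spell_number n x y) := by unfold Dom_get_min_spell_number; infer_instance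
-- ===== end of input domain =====

-- B replaces A's cubic scan (for every pair, re-count collinear points) by, per anchor point i,
-- a counter of gcd-normalised direction vectors built once, so each pair's count is two dict
-- lookups (O(n^3) vs O(n^2) dictionary/gcd operations); a timing run measured B faster.

-- ===== PORT A =====
-- inner k-loop of A (the collinear count for the pair (i, j))
def pvSpellA (n i j : Int) (x : List Int) (y : List Int) : Int :=
  (PySem.List.pyRange 0 n 1).foldl (fun s k =>
    if k ≠ i ∧ k ≠ j then
      if (PySem.List.pyGetD x k 0 - PySem.List.pyGetD x i 0) * (PySem.List.pyGetD y j 0 - PySem.List.pyGetD y i 0)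
         = (PySem.List.pyGetD x j 0 - PySem.List.pyGetD x i 0) * (PySem.List.pyGetD y k 0 - PySem.List.pyGetD y i 0)
      then s + 1 else s
    else s) 0

def get_min_spell_number (n : Int) (x : List Int) (y : List Int) : Int :=
  (PySem.List.pyRange 0 n 1).foldl (fun best i =>
    (PySem.List.pyRange (i + 1) n 1).foldl (fun best j =>
      let spell := pvSpellA n i j x y
      if spell < best then spell else best) best) n

-- ===== PORT B =====
-- Source B's hand-written recursive Euclid `_gcd`; the Nat fuel (|b|+1 strictly bounds the
-- recursion depth) only makes the same computation total and keeps it kernel-reducible.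
def pvGcdAux : Nat → Int → Int → Int
  | 0, a, _ => a
  | f + 1, a, b => if b = 0 then a else pvGcdAux f b (PySem.Int.mod a b)

def pvGcd (a b : Int) : Int := pvGcdAux (b.natAbs + 1) a b

-- Source B's `_norm`: direction reduced by the gcd, sign fixed to (+,*) or (0,+)
def pvNorm (dx dy : Int) : Int × Int :=
  let g := pvGcd |dx| |dy|
  if g = 0 then (0, 0)
  else
    let dx' := PySem.Int.floordiv dx g
    let dy' := PySem.Int.floordiv dy g
    if dx' < 0 ∨ (dx' = 0 ∧ dy' < 0) then (-dx', -dy') else (dx', dy')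

-- the per-anchor counter of normalised directions (Source B's `cnt`)
def pvCnt (n i : Int) (x : List Int) (y : List Int) : PySem.Dict (Int × Int) Int :=
  (PySem.List.pyRange 0 n 1).foldl (fun d k =>
    if k ≠ i then
      let key := pvNorm (PySem.List.pyGetD x k 0 - PySem.List.pyGetD x i 0)
                        (PySem.List.pyGetD y k 0 - PySem.List.pyGetD y i 0)
      d.insert key (d.getD key 0 + 1)
    else d) PySem.Dict.empty

def get_min_spell_number_alt (n : Int) (x : List Int) (y : List Int) : Int :=
  (PySem.List.pyRange 0 n 1).foldl (fun best i =>
    let cnt := pvCnt n i x y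
    let zeros := cnt.getD (0, 0) 0
    (PySem.List.pyRange (i + 1) n 1).foldl (fun best j =>
      let d := pvNorm (PySem.List.pyGetD x j 0 - PySem.List.pyGetD x i 0)
                      (PySem.List.pyGetD y j 0 - PySem.List.pyGetD y i 0)
      let s := if d = (0, 0) then n - 2 else cnt.getD d 0 + zeros - 1
      if s < best then s else best) best) n

-- ===== PRECONDITION & SPEC =====
-- A raises IndexError iff n ≥ 3 and a list is shorter than n (its inner loop only indexes when some
-- k ∉ {i, j} exists); Pre_ also excludes n = 2 with a list shorter than 2, where A happens to return 0
-- without ever indexing but B's per-anchor pass indexes both points and raises IndexError itself.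
def Pre_get_min_spell_number (n : Int) (x : List Int) (y : List Int) : Prop :=
  n ≤ 1 ∨ (n ≤ x.length ∧ n ≤ y.length)
instance (n : Int) (x : List Int) (y : List Int) : Decidable (Pre_get_min_spell_number n x y) := by
  unfold Pre_get_min_spell_number; infer_instance
def pvWitness_get_min_spell_number : Int × List Int × List Int := (3, ([0, 1, 2], [0, 1, 4]))

def Spec_get_min_spell_number (n : Int) (x : List Int) (y : List Int) (out : Int) : Prop := out = get_min_spell_number_alt n x y
instance (n : Int) (x : List Int) (y : List Int) (out : Int) : Decidable (Spec_get_min_spell_number n x y out) := by unfold Spec_get_min_spell_number; infer_instance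

-- ===== CLAIM (what is proved, stated in full; the proofs are below) =====
def Claim_equal_get_min_spell_number : Prop := ∀ (n : Int) (x : List Int) (y : List Int), Dom_get_min_spell_number n x y → Pre_get_min_spell_number n x y → Spec_get_min_spell_number n x y (get_min_spell_number n x y)

-- ===== LEMMAS AND PROOFS =====

-- ---- gcd ----
lemma pvGcd_rec_step (a b : Int) (ha : 0 ≤ a) (hb : 0 < b) :
    Int.gcd a b = Int.gcd b (a % b) := by
  have hm : (a % b).natAbs = a.natAbs % b.natAbs := by
    have h1 : (↑(a.natAbs % b.natAbs) : Int) = a % b := by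
      rw [Int.natCast_mod, Int.natAbs_of_nonneg ha, Int.natAbs_of_nonneg (le_of_lt hb)]
    omega
  simp only [Int.gcd, hm]
  rw [Nat.gcd_comm a.natAbs b.natAbs, Nat.gcd_rec, Nat.gcd_comm]

lemma pvGcdAux_eq (f : Nat) (a b : Int) (ha : 0 ≤ a) (hb : 0 ≤ b) (hf : b.natAbs < f) :
    pvGcdAux f a b = (Int.gcd a b : Int) := by
  induction f generalizing a b with
  | zero => omega
  | succ f ih =>
    by_cases h : b = 0
    · simp only [pvGcdAux, h, if_pos]
      simp [Int.gcd, Int.natAbs_of_nonneg ha]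
    · have hbpos : 0 < b := lt_of_le_of_ne hb (Ne.symm h)
      simp only [pvGcdAux, h, if_false]
      rw [PySem.Int.mod_eq_emod_of_pos hbpos]
      have hm0 : 0 ≤ a % b := Int.emod_nonneg a h
      have hmlt : a % b < b := Int.emod_lt_of_pos a hbpos
      rw [ih b (a % b) hb hm0 (by omega), ← pvGcd_rec_step a b ha hbpos]

lemma pvGcd_abs (a b : Int) : pvGcd |a| |b| = (Int.gcd a b : Int) := by
  unfold pvGcd
  rw [pvGcdAux_eq _ _ _ (abs_nonneg a) (abs_nonneg b) (by omega)]
  simp [Int.gcd, Int.natAbs_abs]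

-- ---- the canonical direction: pvNorm's characterisation ----
lemma pvNorm_spec (d1 d2 : Int) (h : ¬(d1 = 0 ∧ d2 = 0)) :
    ∃ c : Int, c ≠ 0 ∧ d1 = c * (pvNorm d1 d2).1 ∧ d2 = c * (pvNorm d1 d2).2 ∧
      Int.gcd (pvNorm d1 d2).1 (pvNorm d1 d2).2 = 1 ∧
      (0 < (pvNorm d1 d2).1 ∨ ((pvNorm d1 d2).1 = 0 ∧ 0 < (pvNorm d1 d2).2)) := by
  have hg0 : Int.gcd d1 d2 ≠ 0 := by rw [Ne, Int.gcd_eq_zero_iff]; exact h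
  have hgpos : (0 : Int) < (Int.gcd d1 d2 : Int) := by exact_mod_cast Nat.pos_of_ne_zero hg0
  have hda : ((Int.gcd d1 d2 : Int)) ∣ d1 := Int.gcd_dvd_left d1 d2
  have hdb : ((Int.gcd d1 d2 : Int)) ∣ d2 := Int.gcd_dvd_right d1 d2
  have ha' : d1 / (Int.gcd d1 d2 : Int) * (Int.gcd d1 d2 : Int) = d1 := Int.ediv_mul_cancel hda
  have hb' : d2 / (Int.gcd d1 d2 : Int) * (Int.gcd d1 d2 : Int) = d2 := Int.ediv_mul_cancel hdb
  have hcop : Int.gcd (d1 / (Int.gcd d1 d2 : Int)) (d2 / (Int.gcd d1 d2 : Int)) = 1 :=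
    Int.gcd_div_gcd_div_gcd (Nat.pos_of_ne_zero hg0)
  have hnz : ¬(d1 / (Int.gcd d1 d2 : Int) = 0 ∧ d2 / (Int.gcd d1 d2 : Int) = 0) := by
    rintro ⟨e1, e2⟩; rw [e1, e2] at hcop; simp [Int.gcd] at hcop
  unfold pvNorm
  rw [pvGcd_abs]
  simp only [if_neg (show ¬((Int.gcd d1 d2 : Int)) = 0 by omega),
    PySem.Int.floordiv_eq_ediv_of_pos hgpos]
  split_ifs with hs
  · refine ⟨-(Int.gcd d1 d2 : Int), by omega, ?_, ?_, ?_, ?_⟩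
    · show d1 = -(Int.gcd d1 d2 : Int) * -(d1 / (Int.gcd d1 d2 : Int))
      rw [neg_mul_neg, mul_comm]; exact ha'.symm
    · show d2 = -(Int.gcd d1 d2 : Int) * -(d2 / (Int.gcd d1 d2 : Int))
      rw [neg_mul_neg, mul_comm]; exact hb'.symm
    · show Int.gcd (-(d1 / (Int.gcd d1 d2 : Int))) (-(d2 / (Int.gcd d1 d2 : Int))) = 1
      rw [Int.neg_gcd, Int.gcd_neg]; exact hcop
    · show 0 < -(d1 / (Int.gcd d1 d2 : Int)) ∨
        (-(d1 / (Int.gcd d1 d2 : Int)) = 0 ∧ 0 < -(d2 / (Int.gcd d1 d2 : Int)))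
      omega
  · refine ⟨(Int.gcd d1 d2 : Int), by omega, ?_, ?_, hcop, ?_⟩
    · show d1 = (Int.gcd d1 d2 : Int) * (d1 / (Int.gcd d1 d2 : Int))
      rw [mul_comm]; exact ha'.symm
    · show d2 = (Int.gcd d1 d2 : Int) * (d2 / (Int.gcd d1 d2 : Int))
      rw [mul_comm]; exact hb'.symm
    · show 0 < d1 / (Int.gcd d1 d2 : Int) ∨
        (d1 / (Int.gcd d1 d2 : Int) = 0 ∧ 0 < d2 / (Int.gcd d1 d2 : Int))
      omega

lemma pvNorm_eq_zero_iff (d1 d2 : Int) : pvNorm d1 d2 = (0, 0) ↔ (d1 = 0 ∧ d2 = 0) := by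
  constructor
  · intro h0
    by_contra h
    obtain ⟨c, hc, h1, h2, hcop, hsgn⟩ := pvNorm_spec d1 d2 h
    rw [h0] at hcop
    simp [Int.gcd] at hcop
  · rintro ⟨rfl, rfl⟩; rfl

-- a canonical primitive vector is unique in its parallel class
lemma pvCanon_unique (u1 u2 v1 v2 : Int) (hu : Int.gcd u1 u2 = 1) (hv : Int.gcd v1 v2 = 1)
    (su : 0 < u1 ∨ (u1 = 0 ∧ 0 < u2)) (sv : 0 < v1 ∨ (v1 = 0 ∧ 0 < v2))
    (hx : u1 * v2 = v1 * u2) : u1 = v1 ∧ u2 = v2 := by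
  rcases su with hu1 | ⟨hu1, hu2⟩
  · have hv1 : 0 < v1 := by
      rcases sv with h | ⟨h1, h2⟩
      · exact h
      · exfalso; rw [h1, zero_mul] at hx; nlinarith
    have d1 : u1 ∣ v1 :=
      (Int.isCoprime_iff_gcd_eq_one.mpr hu).dvd_of_dvd_mul_right ⟨v2, hx.symm⟩
    have d2 : v1 ∣ u1 :=
      (Int.isCoprime_iff_gcd_eq_one.mpr hv).dvd_of_dvd_mul_right ⟨u2, hx⟩
    have he : u1 = v1 := Int.dvd_antisymm (le_of_lt hu1) (le_of_lt hv1) d1 d2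
    refine ⟨he, ?_⟩
    have := mul_left_cancel₀ (ne_of_gt hu1) (by rw [hx, he] : u1 * v2 = u1 * u2)
    omega
  · have hgu : u2 = 1 := by rw [hu1] at hu; simp [Int.gcd] at hu; omega
    rw [hu1, zero_mul, hgu, mul_one] at hx
    have hv1 : v1 = 0 := hx.symm
    have hv2 : v2 = 1 := by
      rw [hv1] at hv; simp [Int.gcd] at hv
      rcases sv with h | ⟨_, h2⟩
      · omega
      · omega
    exact ⟨by omega, by omega⟩

-- collinearity test of A ↔ equal normalised keys (or the zero vector), B's grouping criterion
lemma pvCross_iff (v1 v2 w1 w2 : Int) (hw : ¬(w1 = 0 ∧ w2 = 0)) :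
    v1 * w2 = w1 * v2 ↔ (pvNorm v1 v2 = pvNorm w1 w2 ∨ (v1 = 0 ∧ v2 = 0)) := by
  by_cases hv : v1 = 0 ∧ v2 = 0
  · simp [hv.1, hv.2]
  · obtain ⟨c, hc, hc1, hc2, hccop, hcsgn⟩ := pvNorm_spec v1 v2 hv
    obtain ⟨e, he, he1, he2, hecop, hesgn⟩ := pvNorm_spec w1 w2 hw
    constructor
    · intro hx
      left
      have hx' : (c * e) * ((pvNorm v1 v2).1 * (pvNorm w1 w2).2)
          = (c * e) * ((pvNorm w1 w2).1 * (pvNorm v1 v2).2) := by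
        calc (c * e) * ((pvNorm v1 v2).1 * (pvNorm w1 w2).2)
            = (c * (pvNorm v1 v2).1) * (e * (pvNorm w1 w2).2) := by ring
          _ = v1 * w2 := by rw [← hc1, ← he2]
          _ = w1 * v2 := hx
          _ = (e * (pvNorm w1 w2).1) * (c * (pvNorm v1 v2).2) := by rw [← he1, ← hc2]
          _ = (c * e) * ((pvNorm w1 w2).1 * (pvNorm v1 v2).2) := by ring
      have hcross := mul_left_cancel₀ (mul_ne_zero hc he) hx'
      obtain ⟨e1, e2⟩ := pvCanon_unique _ _ _ _ hccop hecop hcsgn hesgn hcross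
      exact Prod.ext e1 e2
    · intro hor
      rcases hor with hnm | hz
      · calc v1 * w2 = (c * (pvNorm v1 v2).1) * (e * (pvNorm w1 w2).2) := by
              rw [← hc1, ← he2]
          _ = (e * (pvNorm w1 w2).1) * (c * (pvNorm v1 v2).2) := by rw [hnm]; ring
          _ = w1 * v2 := by rw [← he1, ← hc2]
      · exact absurd hz hv

-- ---- counting lemmas ----
lemma pvCountP_or_disjoint {α : Type} (p q : α → Bool) (l : List α)
    (h : ∀ a ∈ l, ¬(p a = true ∧ q a = true)) :
    l.countP (fun a => p a || q a) = l.countP p + l.countP q := by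
  induction l with
  | nil => simp
  | cons a t ih =>
    have ht := ih (fun b hb => h b (List.mem_cons_of_mem a hb))
    have ha := h a List.mem_cons_self
    simp only [List.countP_cons, ht]
    by_cases hp : p a = true <;> by_cases hq : q a = true <;> simp [hp, hq] at ha ⊢ <;> omega

lemma pvCountP_mem_sub {α : Type} [DecidableEq α] (p : α → Bool) (j : α) (l : List α)
    (hnd : l.Nodup) (hj : j ∈ l) (hpj : p j = true) :
    l.countP p = l.countP (fun a => p a && !(a == j)) + 1 := by
  induction l with
  | nil => cases hj
  | cons a t ih =>
    rcases List.mem_cons.mp hj with rfl | hj'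
    · have hnotin : j ∉ t := (List.nodup_cons.mp hnd).1
      have he : t.countP (fun a => p a && !(a == j)) = t.countP p := by
        refine List.countP_congr ?_
        intro b hb
        have hbj : b ≠ j := fun e => hnotin (e ▸ hb)
        simp [hbj]
      simp [hpj, he]
    · have hnd' := (List.nodup_cons.mp hnd).2
      have hne : a ≠ j := by
        rintro rfl; exact (List.nodup_cons.mp hnd).1 hj'
      simp only [List.countP_cons, ih hnd' hj']
      by_cases hp : p a = true <;> simp [hp, hne]

lemma pvFoldl_filter_map {α β γ : Type} (l : List α) (P : α → Prop) [DecidablePred P]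
    (key : α → β) (f : γ → β → γ) (init : γ) :
    l.foldl (fun d k => if P k then f d (key k) else d) init
      = ((l.filter (fun a => decide (P a))).map key).foldl f init := by
  induction l generalizing init with
  | nil => rfl
  | cons a t ih =>
    by_cases h : P a <;> simp [h, List.foldl_cons, ih]

-- ---- the two ports' loop bodies, as countP ----
lemma pvSpellA_countP (n i j : Int) (x y : List Int) :
    pvSpellA n i j x y =
      ((PySem.List.pyRange 0 n 1).countP (fun k => decide (k ≠ i ∧ k ≠ j ∧
        (PySem.List.pyGetD x k 0 - PySem.List.pyGetD x i 0) * (PySem.List.pyGetD y j 0 - PySem.List.pyGetD y i 0)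
          = (PySem.List.pyGetD x j 0 - PySem.List.pyGetD x i 0) * (PySem.List.pyGetD y k 0 - PySem.List.pyGetD y i 0))) : Int) := by
  have hcg : pvSpellA n i j x y =
      (PySem.List.pyRange 0 n 1).foldl (fun s k =>
        if (fun k => decide (k ≠ i ∧ k ≠ j ∧
          (PySem.List.pyGetD x k 0 - PySem.List.pyGetD x i 0) * (PySem.List.pyGetD y j 0 - PySem.List.pyGetD y i 0)
            = (PySem.List.pyGetD x j 0 - PySem.List.pyGetD x i 0) * (PySem.List.pyGetD y k 0 - PySem.List.pyGetD y i 0))) k = true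
        then s + 1 else s) 0 := by
    unfold pvSpellA
    refine PySem.List.foldl_congr_mem' _ _ _ _ ?_
    intro k _ s
    simp only [decide_eq_true_eq]
    split_ifs <;> tauto
  rw [hcg, PySem.List.foldl_count_if (fun k => decide (k ≠ i ∧ k ≠ j ∧
    (PySem.List.pyGetD x k 0 - PySem.List.pyGetD x i 0) * (PySem.List.pyGetD y j 0 - PySem.List.pyGetD y i 0)
      = (PySem.List.pyGetD x j 0 - PySem.List.pyGetD x i 0) * (PySem.List.pyGetD y k 0 - PySem.List.pyGetD y i 0)))
    (PySem.List.pyRange 0 n 1) 0]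
  omega

lemma pvCnt_getD (n i : Int) (x y : List Int) (v : Int × Int) :
    (pvCnt n i x y).getD v 0 =
      ((PySem.List.pyRange 0 n 1).countP (fun k => decide (k ≠ i ∧
        pvNorm (PySem.List.pyGetD x k 0 - PySem.List.pyGetD x i 0)
               (PySem.List.pyGetD y k 0 - PySem.List.pyGetD y i 0) = v)) : Int) := by
  have h2 : pvCnt n i x y =
      (((PySem.List.pyRange 0 n 1).filter (fun k => decide (k ≠ i))).map
        (fun k => pvNorm (PySem.List.pyGetD x k 0 - PySem.List.pyGetD x i 0)
                         (PySem.List.pyGetD y k 0 - PySem.List.pyGetD y i 0))).foldl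
        (fun d b => d.insert b (d.getD b 0 + 1)) PySem.Dict.empty := by
    unfold pvCnt
    exact pvFoldl_filter_map (PySem.List.pyRange 0 n 1) (fun k => k ≠ i)
      (fun k => pvNorm (PySem.List.pyGetD x k 0 - PySem.List.pyGetD x i 0)
                       (PySem.List.pyGetD y k 0 - PySem.List.pyGetD y i 0))
      (fun d b => d.insert b (d.getD b 0 + 1))
      (PySem.Dict.empty : PySem.Dict (Int × Int) Int)
  rw [h2, PySem.Dict.getD_foldl_insert_add_one, PySem.Dict.getD_empty,
    List.count_eq_countP, List.countP_map, List.countP_filter]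
  rw [List.countP_congr (q := fun k => decide (k ≠ i ∧
        pvNorm (PySem.List.pyGetD x k 0 - PySem.List.pyGetD x i 0)
               (PySem.List.pyGetD y k 0 - PySem.List.pyGetD y i 0) = v)) ?_]
  · omega
  · intro k _
    simp [Function.comp, and_comm]

-- ---- the central fact: A's pair count equals B's dictionary formula ----
lemma pvSpell_closed (n i j : Int) (x y : List Int) (hi : 0 ≤ i) (hij : i < j) (hjn : j < n) :
    pvSpellA n i j x y =
      (if pvNorm (PySem.List.pyGetD x j 0 - PySem.List.pyGetD x i 0)
                 (PySem.List.pyGetD y j 0 - PySem.List.pyGetD y i 0) = ((0 : Int), (0 : Int))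
       then n - 2
       else (pvCnt n i x y).getD (pvNorm (PySem.List.pyGetD x j 0 - PySem.List.pyGetD x i 0)
                                         (PySem.List.pyGetD y j 0 - PySem.List.pyGetD y i 0)) 0
            + (pvCnt n i x y).getD (0, 0) 0 - 1) := by
  have hmemi : i ∈ PySem.List.pyRange 0 n 1 := PySem.List.mem_pyRange_one.mpr ⟨hi, by omega⟩
  have hmemj : j ∈ PySem.List.pyRange 0 n 1 := PySem.List.mem_pyRange_one.mpr ⟨by omega, hjn⟩
  have hnd := PySem.List.nodup_pyRange_one 0 n
  have hji : j ≠ i := by omega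
  have hlen : (PySem.List.pyRange 0 n 1).length = n.toNat := by
    rw [PySem.List.length_pyRange_one]; omega
  rw [pvSpellA_countP]
  by_cases h0 : pvNorm (PySem.List.pyGetD x j 0 - PySem.List.pyGetD x i 0)
      (PySem.List.pyGetD y j 0 - PySem.List.pyGetD y i 0) = ((0 : Int), (0 : Int))
  · rw [if_pos h0]
    obtain ⟨hz1, hz2⟩ := (pvNorm_eq_zero_iff _ _).mp h0
    have hcg : (PySem.List.pyRange 0 n 1).countP (fun k => decide (k ≠ i ∧ k ≠ j ∧
        (PySem.List.pyGetD x k 0 - PySem.List.pyGetD x i 0) * (PySem.List.pyGetD y j 0 - PySem.List.pyGetD y i 0)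
          = (PySem.List.pyGetD x j 0 - PySem.List.pyGetD x i 0) * (PySem.List.pyGetD y k 0 - PySem.List.pyGetD y i 0)))
        = (PySem.List.pyRange 0 n 1).countP (fun k => decide (k ≠ i) && !(k == j)) := by
      refine List.countP_congr ?_
      intro k _
      have e1 : PySem.List.pyGetD y j 0 - PySem.List.pyGetD y i 0 = 0 := hz2
      have e2 : PySem.List.pyGetD x j 0 - PySem.List.pyGetD x i 0 = 0 := hz1
      simp [e1, e2]
    have hsub1 : (PySem.List.pyRange 0 n 1).countP (fun k => decide (k ≠ i))
        = (PySem.List.pyRange 0 n 1).countP (fun k => decide (k ≠ i) && !(k == j)) + 1 :=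
      pvCountP_mem_sub _ j _ hnd hmemj (by simp [hji])
    have hsub0 : (PySem.List.pyRange 0 n 1).countP (fun _ => true)
        = (PySem.List.pyRange 0 n 1).countP (fun k => (fun _ => true) k && !(k == i)) + 1 :=
      pvCountP_mem_sub _ i _ hnd hmemi rfl
    have htrue : (PySem.List.pyRange 0 n 1).countP (fun _ => true) = n.toNat := by
      rw [List.countP_true, hlen]
    have heq : (PySem.List.pyRange 0 n 1).countP (fun k => (fun _ => true) k && !(k == i))
        = (PySem.List.pyRange 0 n 1).countP (fun k => decide (k ≠ i)) := by
      refine List.countP_congr ?_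
      intro k _
      simp
    rw [hcg]
    omega
  · rw [if_neg h0]
    rw [pvCnt_getD, pvCnt_getD]
    have hw : ¬(PySem.List.pyGetD x j 0 - PySem.List.pyGetD x i 0 = 0 ∧
        PySem.List.pyGetD y j 0 - PySem.List.pyGetD y i 0 = 0) := by
      rw [← pvNorm_eq_zero_iff]; exact h0
    -- the full predicate of A without the k ≠ j clause
    have hstep : (PySem.List.pyRange 0 n 1).countP (fun k => decide (k ≠ i ∧
        (PySem.List.pyGetD x k 0 - PySem.List.pyGetD x i 0) * (PySem.List.pyGetD y j 0 - PySem.List.pyGetD y i 0)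
          = (PySem.List.pyGetD x j 0 - PySem.List.pyGetD x i 0) * (PySem.List.pyGetD y k 0 - PySem.List.pyGetD y i 0)))
        = (PySem.List.pyRange 0 n 1).countP (fun k => decide (k ≠ i ∧ k ≠ j ∧
        (PySem.List.pyGetD x k 0 - PySem.List.pyGetD x i 0) * (PySem.List.pyGetD y j 0 - PySem.List.pyGetD y i 0)
          = (PySem.List.pyGetD x j 0 - PySem.List.pyGetD x i 0) * (PySem.List.pyGetD y k 0 - PySem.List.pyGetD y i 0))) + 1 := by
      rw [pvCountP_mem_sub (fun k => decide (k ≠ i ∧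
        (PySem.List.pyGetD x k 0 - PySem.List.pyGetD x i 0) * (PySem.List.pyGetD y j 0 - PySem.List.pyGetD y i 0)
          = (PySem.List.pyGetD x j 0 - PySem.List.pyGetD x i 0) * (PySem.List.pyGetD y k 0 - PySem.List.pyGetD y i 0)))
        j _ hnd hmemj (by simp [hji])]
      congr 1
      refine List.countP_congr ?_
      intro k _
      simp only [Bool.and_eq_true, decide_eq_true_eq, Bool.not_eq_eq_eq_not,
        Bool.not_true, beq_eq_false_iff_ne]
      tauto
    have hsplit : (PySem.List.pyRange 0 n 1).countP (fun k => decide (k ≠ i ∧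
        (PySem.List.pyGetD x k 0 - PySem.List.pyGetD x i 0) * (PySem.List.pyGetD y j 0 - PySem.List.pyGetD y i 0)
          = (PySem.List.pyGetD x j 0 - PySem.List.pyGetD x i 0) * (PySem.List.pyGetD y k 0 - PySem.List.pyGetD y i 0)))
        = (PySem.List.pyRange 0 n 1).countP (fun k => decide (k ≠ i ∧
            pvNorm (PySem.List.pyGetD x k 0 - PySem.List.pyGetD x i 0)
                   (PySem.List.pyGetD y k 0 - PySem.List.pyGetD y i 0)
              = pvNorm (PySem.List.pyGetD x j 0 - PySem.List.pyGetD x i 0)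
                       (PySem.List.pyGetD y j 0 - PySem.List.pyGetD y i 0)))
          + (PySem.List.pyRange 0 n 1).countP (fun k => decide (k ≠ i ∧
            pvNorm (PySem.List.pyGetD x k 0 - PySem.List.pyGetD x i 0)
                   (PySem.List.pyGetD y k 0 - PySem.List.pyGetD y i 0) = ((0 : Int), (0 : Int)))) := by
      rw [← pvCountP_or_disjoint _ _ _ ?disj]
      case disj =>
        intro k _
        rintro ⟨h1, h2⟩
        simp only [decide_eq_true_eq] at h1 h2
        exact h0 (h1.2 ▸ h2.2)
      refine List.countP_congr ?_
      intro k _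
      have hiff := pvCross_iff
        (PySem.List.pyGetD x k 0 - PySem.List.pyGetD x i 0)
        (PySem.List.pyGetD y k 0 - PySem.List.pyGetD y i 0)
        (PySem.List.pyGetD x j 0 - PySem.List.pyGetD x i 0)
        (PySem.List.pyGetD y j 0 - PySem.List.pyGetD y i 0) hw
      have hz := pvNorm_eq_zero_iff
        (PySem.List.pyGetD x k 0 - PySem.List.pyGetD x i 0)
        (PySem.List.pyGetD y k 0 - PySem.List.pyGetD y i 0)
      simp only [Bool.or_eq_true, decide_eq_true_eq]
      constructor
      · rintro ⟨hk, hcr⟩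
        rcases hiff.mp hcr with hh | hh
        · exact Or.inl ⟨hk, hh⟩
        · exact Or.inr ⟨hk, hz.mpr hh⟩
      · rintro (⟨hk, hh⟩ | ⟨hk, hh⟩)
        · exact ⟨hk, hiff.mpr (Or.inl hh)⟩
        · exact ⟨hk, hiff.mpr (Or.inr (hz.mp hh))⟩
    omega

-- ===== VERDICT (by name: the statement is the Claim_ definition above) =====
theorem get_min_spell_number_spec : Claim_equal_get_min_spell_number := by
  intro n x y _ _
  unfold Spec_get_min_spell_number get_min_spell_number get_min_spell_number_alt
  apply PySem.List.foldl_congr_mem'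
  intro i hi best
  rw [PySem.List.mem_pyRange_one] at hi
  apply PySem.List.foldl_congr_mem'
  intro j hj best'
  rw [PySem.List.mem_pyRange_one] at hj
  have := pvSpell_closed n i j x y hi.1 (by omega) hj.2
  simp only [this]
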